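-- pv_equiv track=rewrite | github.com/clarkngo/python-projects | archive-20200922/math/binary_gap.py | longest_gap
-- ===== SOURCE A (Python) =====
-- def longest_gap(strng: str) -> int:
--     longest = 0
--     count = 0
--     for i in range(1, len(strng)):
--         if strng[i] == '0':
--             count += 1
--         else:
--             if count > longest:
--                 longest = count
--             count = 0
--     return longest
-- ===== SOURCE B (Python) =====
-- def longest_gap(strng: str) -> int:
--     # marker positions: index 0 plus every non-'0' position; a terminated zero-run
--     # is exactly the span between two consecutive markers.
--     marks = [0] + [i for i in range(1, len(strng)) if strng[i] != '0']
--     return max((b - a - 1 for a, b in zip(marks, marks[1:])), default=0)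
-- ===== Notes on version B (the rewrite author's own statement) =====
-- stated objective: idiomatic
-- what changed: Replaced the stateful accumulate-and-reset scan by a declarative marker-positions formulation: collect index 0 plus all non-'0' positions and take the maximum gap between consecutive markers (default 0), which automatically skips index 0 and excludes a trailing zero-run.
import Mathlib
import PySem

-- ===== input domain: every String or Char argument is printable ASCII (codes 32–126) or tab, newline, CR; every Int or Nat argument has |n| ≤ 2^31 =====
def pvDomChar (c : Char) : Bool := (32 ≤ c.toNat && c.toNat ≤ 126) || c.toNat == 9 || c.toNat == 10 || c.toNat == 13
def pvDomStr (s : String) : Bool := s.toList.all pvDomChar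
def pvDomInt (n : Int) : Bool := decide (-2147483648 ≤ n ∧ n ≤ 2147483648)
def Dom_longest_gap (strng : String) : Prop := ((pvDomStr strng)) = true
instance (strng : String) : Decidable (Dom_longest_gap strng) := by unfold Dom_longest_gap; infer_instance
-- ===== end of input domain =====

-- B replaces A's accumulate-and-reset scan by a marker-positions formulation (max gap
-- between consecutive non-'0' positions, seeded with index 0); same result, same O(n) cost.

-- ===== PORT A =====
def longest_gap (strng : String) : Int :=
  ((PySem.List.pyRange 1 (PySem.Str.len strng) 1).foldl
      (fun (st : Int × Int) i =>
        if PySem.Str.pyGet? strng i = some '0' then (st.1, st.2 + 1)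
        else (if st.2 > st.1 then st.2 else st.1, 0))
      (0, 0)).1

-- ===== PORT B =====
def longest_gap_alt (strng : String) : Int :=
  let marks : List Int :=
    0 :: (PySem.List.pyRange 1 (PySem.Str.len strng) 1).filter
      (fun i => !(PySem.Str.pyGet? strng i == some '0'))
  let diffs : List Int :=
    (marks.zip (PySem.List.slice marks (some 1) none)).map (fun ab => ab.2 - ab.1 - 1)
  PySem.List.maxD diffs (fun x => x) 0

-- ===== PRECONDITION & SPEC =====
def Spec_longest_gap (strng : String) (out : Int) : Prop := out = longest_gap_alt strng
instance (strng : String) (out : Int) : Decidable (Spec_longest_gap strng out) := by unfold Spec_longest_gap; infer_instance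

-- ===== CLAIM (what is proved, stated in full; the proofs are below) =====
def Claim_equal_longest_gap : Prop := ∀ (strng : String), Dom_longest_gap strng → Spec_longest_gap strng (longest_gap strng)

-- ===== LEMMAS AND PROOFS =====

-- Loop invariant: with the last marker at position m (so A's count is p-1-m at
-- position p = len-k), A's remaining scan computes the running max over the remaining gaps.
lemma gap_inv (strng : String) (k : Nat) :
    ∀ (m longest : Int),
      ((PySem.List.pyRange (PySem.Str.len strng - k) (PySem.Str.len strng) 1).foldl
          (fun (st : Int × Int) i =>
            if PySem.Str.pyGet? strng i = some '0' then (st.1, st.2 + 1)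
            else (if st.2 > st.1 then st.2 else st.1, 0))
          (longest, PySem.Str.len strng - k - 1 - m)).1
      =
      (((m :: (PySem.List.pyRange (PySem.Str.len strng - k) (PySem.Str.len strng) 1).filter
            (fun i => !(PySem.Str.pyGet? strng i == some '0'))).zip
          ((PySem.List.pyRange (PySem.Str.len strng - k) (PySem.Str.len strng) 1).filter
            (fun i => !(PySem.Str.pyGet? strng i == some '0')))).map
          (fun ab => ab.2 - ab.1 - 1)).foldl max longest := by
  induction k with
  | zero =>
      intro m longest
      rw [PySem.List.pyRange_one_eq_nil (by omega)]
      simp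
  | succ k ih =>
      intro m longest
      have hlt : PySem.Str.len strng - ((k : Int) + 1) < PySem.Str.len strng := by omega
      have hcast : ((k + 1 : Nat) : Int) = (k : Int) + 1 := by push_cast; ring
      rw [hcast, PySem.List.pyRange_one_cons hlt]
      have hstep : PySem.Str.len strng - ((k : Int) + 1) + 1 = PySem.Str.len strng - (k : Int) := by ring
      rw [hstep]
      by_cases h : PySem.Str.pyGet? strng (PySem.Str.len strng - ((k : Int) + 1)) = some '0'
      · simp only [List.foldl_cons, List.filter_cons, h, if_true,
          beq_self_eq_true, Bool.not_true, Bool.false_eq_true, if_false]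
        have e : PySem.Str.len strng - ((k : Int) + 1) - 1 - m + 1
            = PySem.Str.len strng - (k : Int) - 1 - m := by ring
        rw [e]
        exact ih m longest
      · have hb : (PySem.Str.pyGet? strng (PySem.Str.len strng - ((k : Int) + 1)) == some '0') = false :=
          beq_eq_false_iff_ne.mpr h
        simp only [List.foldl_cons, List.filter_cons, if_neg h, hb, Bool.not_false, if_true,
          List.zip_cons_cons, List.map_cons]
        have emax : (if PySem.Str.len strng - ((k : Int) + 1) - 1 - m > longest
              then PySem.Str.len strng - ((k : Int) + 1) - 1 - m else longest)
            = max longest (PySem.Str.len strng - ((k : Int) + 1) - m - 1) := by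
          rw [max_def]; split_ifs <;> omega
        rw [emax]
        have ihp := ih (PySem.Str.len strng - ((k : Int) + 1))
          (max longest (PySem.Str.len strng - ((k : Int) + 1) - m - 1))
        have e0 : PySem.Str.len strng - (k : Int) - 1
            - (PySem.Str.len strng - ((k : Int) + 1)) = 0 := by ring
        rw [e0] at ihp
        exact ihp

-- consecutive gaps of a strictly increasing list are nonnegative
lemma gapdiffs_nonneg : ∀ (l : List Int), l.Pairwise (· < ·) →
    ∀ x ∈ ((l.zip l.tail).map (fun ab => ab.2 - ab.1 - 1)), (0 : Int) ≤ x := by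
  intro l
  induction l with
  | nil => intro _ x hx; simp at hx
  | cons a l ih =>
      intro hp x hx
      rcases List.pairwise_cons.mp hp with ⟨ha, hp'⟩
      cases l with
      | nil => simp at hx
      | cons b t =>
          have hab : a < b := ha b (by simp)
          simp only [List.tail_cons, List.zip_cons_cons, List.map_cons, List.mem_cons] at hx
          rcases hx with rfl | hx
          · omega
          · exact ih hp' x hx

-- Python max(xs, default=0) over nonnegative values is the running max from 0
lemma maxD_eq_foldl (l : List Int) (h : ∀ x ∈ l, (0 : Int) ≤ x) :
    PySem.List.maxD l (fun x => x) 0 = l.foldl max 0 := by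
  cases l with
  | nil => rfl
  | cons x t =>
      have hx : max 0 x = x := by
        have := h x (by simp); omega
      simp [PySem.List.maxD, PySem.List.max?_id_cons, hx]

-- the marker list 0 :: {i ∈ [1,n) | s[i] ≠ '0'} is strictly increasing
lemma marks_pairwise (strng : String) :
    ((0 : Int) :: (PySem.List.pyRange 1 (PySem.Str.len strng) 1).filter
        (fun i => !(PySem.Str.pyGet? strng i == some '0'))).Pairwise (· < ·) := by
  rw [List.pairwise_cons]
  constructor
  · intro x hx
    have hmem : x ∈ PySem.List.pyRange 1 (PySem.Str.len strng) 1 := (List.mem_filter.mp hx).1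
    have := (PySem.List.mem_pyRange_one.mp hmem).1
    omega
  · exact (PySem.List.pairwise_lt_pyRange_one 1 (PySem.Str.len strng)).filter _

-- ===== VERDICT (by name: the statement is the Claim_ definition above) =====
theorem longest_gap_spec : Claim_equal_longest_gap := by
  intro strng _
  unfold Spec_longest_gap
  simp only [longest_gap, longest_gap_alt]
  rw [PySem.List.slice_from_one, List.tail_cons]
  rw [maxD_eq_foldl _ (by
    intro x hx
    exact gapdiffs_nonneg _ (marks_pairwise strng) x (by simpa using hx))]
  by_cases hn : 1 ≤ PySem.Str.len strng
  · have inv := gap_inv strng (PySem.Str.len strng - 1).toNat 0 0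
    have hk : PySem.Str.len strng - ((PySem.Str.len strng - 1).toNat : Int) = 1 := by omega
    rw [hk] at inv
    have e : (1 : Int) - 1 - 0 = 0 := by norm_num
    rw [e] at inv
    exact inv
  · rw [PySem.List.pyRange_one_eq_nil (by omega)]
    simp
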